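-- pv_equiv track=rewrite | github.com/Gizem-G/Allotyping-BaseModel | auc_script.py | evaluate_p
-- ===== SOURCE A (Python) =====
-- def evaluate_p(patient, Allele_Patients_positive, output):
--     TP, FN = 0, 0
--     for patient in Allele_Patients_positive:
--         if output:
--             TP = 1
--         if not output:
--             FN = 1
--     return TP, FN
-- ===== SOURCE B (Python) =====
-- def evaluate_p(patient, Allele_Patients_positive, output):
--     nonempty = any(True for _ in Allele_Patients_positive)
--     TP = 1 if (nonempty and output) else 0
--     FN = 1 if (nonempty and not output) else 0
--     return TP, FN
-- ===== Notes on version B (the rewrite author's own statement) =====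
-- stated objective: simpler
-- what changed: Replaces the per-patient loop that repeatedly sets flags with a single emptiness test and two closed-form conditionals on output.
import Mathlib
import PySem

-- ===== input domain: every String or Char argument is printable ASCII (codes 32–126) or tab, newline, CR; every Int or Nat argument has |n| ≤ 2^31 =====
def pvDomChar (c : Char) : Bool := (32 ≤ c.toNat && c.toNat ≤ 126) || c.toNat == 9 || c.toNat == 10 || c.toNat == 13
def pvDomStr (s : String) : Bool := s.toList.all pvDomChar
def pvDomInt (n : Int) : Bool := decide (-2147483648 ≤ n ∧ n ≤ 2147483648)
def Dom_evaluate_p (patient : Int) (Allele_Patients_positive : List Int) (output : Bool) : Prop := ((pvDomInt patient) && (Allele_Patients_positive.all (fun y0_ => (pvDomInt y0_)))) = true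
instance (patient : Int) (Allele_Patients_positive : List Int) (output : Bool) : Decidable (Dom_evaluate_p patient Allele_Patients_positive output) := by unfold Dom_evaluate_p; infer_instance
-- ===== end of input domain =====

-- B replaces A's flag-setting loop with an emptiness test and closed-form conditionals (objective: simpler).


-- ===== PORT A =====
-- Literal port of A: fold over the list updating (TP, FN) as the loop does.
def evaluate_p (patient : Int) (Allele_Patients_positive : List Int) (output : Bool) : Int × Int :=
  Allele_Patients_positive.foldl
    (fun (st : Int × Int) _ =>
      let st1 := if output then (1, st.2) else st
      if !output then (st1.1, 1) else st1)
    (0, 0)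

-- ===== PORT B =====
-- B: emptiness test plus closed-form conditionals.
def evaluate_p_alt (patient : Int) (Allele_Patients_positive : List Int) (output : Bool) : Int × Int :=
  let nonempty := !Allele_Patients_positive.isEmpty
  ((if nonempty && output then 1 else 0), (if nonempty && !output then 1 else 0))

-- ===== PRECONDITION & SPEC =====
def Spec_evaluate_p (patient : Int) (Allele_Patients_positive : List Int) (output : Bool) (out : Int × Int) : Prop := out = evaluate_p_alt patient Allele_Patients_positive output
instance (patient : Int) (Allele_Patients_positive : List Int) (output : Bool) (out : Int × Int) : Decidable (Spec_evaluate_p patient Allele_Patients_positive output out) := by unfold Spec_evaluate_p; infer_instance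

-- ===== CLAIM (what is proved, stated in full; the proofs are below) =====
def Claim_equal_evaluate_p : Prop := ∀ (patient : Int) (Allele_Patients_positive : List Int) (output : Bool), Dom_evaluate_p patient Allele_Patients_positive output → Spec_evaluate_p patient Allele_Patients_positive output (evaluate_p patient Allele_Patients_positive output)

-- ===== LEMMAS AND PROOFS =====

-- ===== VERDICT (by name: the statement is the Claim_ definition above) =====
-- The fold's value depends only on whether the list is empty.
theorem fold_const (l : List Int) (output : Bool) (x : Int × Int) (h : l ≠ []) :
    l.foldl (fun (st : Int × Int) _ =>
      let st1 := if output then (1, st.2) else st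
      if !output then (st1.1, 1) else st1) x
    = ((if output then 1 else x.1), (if output then x.2 else 1)) := by
  induction l generalizing x with
  | nil => exact absurd rfl h
  | cons a t ih =>
    cases t with
    | nil => cases output <;> simp [List.foldl]
    | cons b t2 =>
      rw [List.foldl_cons, ih _ (by simp)]
      cases output <;> simp

theorem evaluate_p_spec : Claim_equal_evaluate_p := by
  intro patient l output _
  unfold Spec_evaluate_p evaluate_p evaluate_p_alt
  cases l with
  | nil => cases output <;> simp
  | cons a t =>
    rw [fold_const _ _ _ (by simp)]
    cases output <;> simp [List.isEmpty]
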